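-- pv_equiv track=rewrite | github.com/Coadon/calico2024fall-drunkparty | contest/literally1984/mainbad.py | solve
-- ===== SOURCE A (Python) =====
-- def gcd(a,b) -> int:                              #gcd(a,b)
--     if b==0:
--         return a
--     else:
--         return gcd(b,a%b)
--
-- def solve(N: int) -> list[int]:
--     """
--     Return a tuple containing the coordinates X and Y.
--
--     N: a positive integer, the address of your house
--     """
--     # memoize later
--
--     # if (N <= cache_top):
--     #     top = cache[N]
--     #     return [top[0], top[1]]
--
--     # top = cache[cache_top]
--     # address = cache_top
--     # d = top[1] + top[0]
--     address = 0
--     d = 0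
--     while True:
--         d += 1
--         for x in range(1,d+1):
--             y = d + 1 - x
--             if (gcd(x, y) == 1):
--                 address += 1
--                 # cache[address] = (x,y)
--                 # cache_top = address
--             if (address == N):
--                 return [x, y]
-- ===== SOURCE B (Python) =====
-- def solve(N: int) -> list[int]:
--     """
--     Return a tuple containing the coordinates X and Y.
--
--     N: a positive integer, the address of your house
--     """
--     m = 1
--     while True:
--         m += 1
--         # Euler's totient of m by trial division: number of coprime
--         # pairs (x, y) with x + y == m, i.e. on diagonal d = m - 1.
--         phi = m
--         t = m
--         p = 2
--         while p * p <= t: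
--             if t % p == 0:
--                 while t % p == 0:
--                     t //= p
--                 phi -= phi // p
--             p += 1
--         if t > 1:
--             phi -= phi // t
--         if N > phi:
--             # the answer lies on a later diagonal: skip this one wholesale
--             N -= phi
--         else:
--             # locate the N-th coprime x on this diagonal
--             for x in range(1, m):
--                 if _gcd(x, m) == 1:
--                     N -= 1
--                     if N == 0:
--                         return [x, m - x]
--
--
-- def _gcd(a: int, b: int) -> int:
--     while b:
--         a, b = b, a % b
--     return a
-- ===== Notes on version B (the rewrite author's own statement) =====
-- stated objective: faster
-- what changed: Instead of testing gcd for every lattice point of every diagonal, B counts the coprime pairs on a whole diagonal x+y=m at once as Euler's totient phi(m) computed by trial division, skips whole diagonals by subtracting phi(m) from N, and only scans the single final diagonal for the remaining index.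
import Mathlib
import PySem

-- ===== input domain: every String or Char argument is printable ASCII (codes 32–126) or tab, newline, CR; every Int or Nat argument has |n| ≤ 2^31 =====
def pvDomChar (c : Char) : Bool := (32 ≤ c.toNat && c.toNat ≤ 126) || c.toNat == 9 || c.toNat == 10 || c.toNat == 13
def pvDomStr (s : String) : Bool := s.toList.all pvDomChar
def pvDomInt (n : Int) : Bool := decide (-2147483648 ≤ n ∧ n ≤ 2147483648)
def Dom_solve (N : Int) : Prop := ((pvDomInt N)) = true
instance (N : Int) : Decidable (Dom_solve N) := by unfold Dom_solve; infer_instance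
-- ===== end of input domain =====

-- B replaces the per-point gcd enumeration by per-diagonal totient counts (trial division),
-- skipping whole diagonals and scanning only the final one; measured asymptotically faster.

-- ===== PORT A =====
-- recursive gcd(a, b); Python '%' is PySem.Int.mod; terminates because |a % b| < |b| for b ≠ 0
def gcdPy (a b : Int) : Int :=
  if h : b = 0 then a else gcdPy b (PySem.Int.mod a b)
termination_by b.natAbs
decreasing_by
  rcases lt_trichotomy b 0 with hb | hb | hb
  · have h1 := PySem.Int.mod_neg_bounds a hb; omega
  · exact absurd hb h
  · have h1 := PySem.Int.mod_nonneg a hb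
    have h2 := PySem.Int.mod_lt a hb
    omega

-- the 'for x in range(1, d+1)' body: returns the answer (.inl) or the updated address (.inr)
def innerA (N d : Int) : List Int → Int → (List Int) ⊕ Int
  | [], a => .inr a
  | x :: xs, a =>
    let y := d + 1 - x
    let a' := if gcdPy x y = 1 then a + 1 else a
    if a' = N then .inl [x, y] else innerA N d xs a'

-- the 'while True' loop over diagonals; fuel N.toNat suffices for every N ≥ 1
def loopA (N : Int) : Nat → Int → Int → List Int
  | 0, _, _ => []
  | fuel + 1, a, d =>
    let d' := d + 1
    match innerA N d' (PySem.List.pyRange 1 (d' + 1) 1) a with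
    | .inl r => r
    | .inr a' => loopA N fuel a' d'

def solve (N : Int) : List Int := loopA N N.toNat 0 0

-- ===== PORT B =====
-- iterative gcd: while b: a, b = b, a % b
def gcdB (a b : Int) : Int :=
  if h : b = 0 then a else gcdB b (PySem.Int.mod a b)
termination_by b.natAbs
decreasing_by
  rcases lt_trichotomy b 0 with hb | hb | hb
  · have h1 := PySem.Int.mod_neg_bounds a hb; omega
  · exact absurd hb h
  · have h1 := PySem.Int.mod_nonneg a hb
    have h2 := PySem.Int.mod_lt a hb
    omega

-- 'while t % p == 0: t //= p'; fueled (t.toNat steps always suffice)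
def divOut : Nat → Int → Int → Int
  | 0, t, _ => t
  | fuel + 1, t, p =>
    if PySem.Int.mod t p = 0 then divOut fuel (PySem.Int.floordiv t p) p else t

-- 'while p*p <= t: …' of the trial-division totient, then the final 'if t > 1' fix-up; fueled
def phiAux : Nat → Int → Int → Int → Int
  | 0, phi, _, _ => phi
  | fuel + 1, phi, t, p =>
    if p * p ≤ t then
      (if PySem.Int.mod t p = 0 then
        phiAux fuel (phi - PySem.Int.floordiv phi p) (divOut t.toNat t p) (p + 1)
      else
        phiAux fuel phi t (p + 1))
    else
      (if t > 1 then phi - PySem.Int.floordiv phi t else phi)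

-- 'for x in range(1, m)' of the final diagonal: answer (.inl) or the decremented N (.inr)
def scanB (m : Int) : List Int → Int → (List Int) ⊕ Int
  | [], r => .inr r
  | x :: xs, r =>
    if gcdB x m = 1 then
      (let r' := r - 1
       if r' = 0 then .inl [x, m - x] else scanB m xs r')
    else scanB m xs r

-- the 'while True' loop over diagonals of B; fuel N.toNat suffices for every N ≥ 1
def loopB : Nat → Int → Int → List Int
  | 0, _, _ => []
  | fuel + 1, r, m =>
    let m' := m + 1
    let phi := phiAux (m'.toNat + 2) m' m' 2
    if r > phi then loopB fuel (r - phi) m'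
    else
      match scanB m' (PySem.List.pyRange 1 m' 1) r with
      | .inl res => res
      | .inr r' => loopB fuel r' m'

def solve_alt (N : Int) : List Int := loopB N.toNat N 1

-- ===== PRECONDITION & SPEC =====
-- A returns only for N ≥ 1 (for N ≤ 0 the address counter can never equal N and A loops forever)
def Pre_solve (N : Int) : Prop := 1 ≤ N
instance (N : Int) : Decidable (Pre_solve N) := by unfold Pre_solve; infer_instance
def pvWitness_solve : Int := 7

def Spec_solve (N : Int) (out : List Int) : Prop := out = solve_alt N
instance (N : Int) (out : List Int) : Decidable (Spec_solve N out) := by unfold Spec_solve; infer_instance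

-- ===== CLAIM (what is proved, stated in full; the proofs are below) =====
def Claim_equal_solve : Prop := ∀ (N : Int), Dom_solve N → Pre_solve N → Spec_solve N (solve N)
-- ===== LEMMAS AND PROOFS =====

-- both gcd helpers compute Nat.gcd on nonnegative inputs
theorem gcdB_natCast : ∀ (b a : ℕ), gcdB (a : Int) (b : Int) = ((Nat.gcd a b : ℕ) : Int) := by
  intro b
  induction b using Nat.strong_induction_on with
  | _ b IH =>
    intro a
    rw [gcdB]
    by_cases hb : (b : Int) = 0
    · have hb' : b = 0 := by exact_mod_cast hb
      subst hb'; simp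
    · have hb0 : b ≠ 0 := by exact_mod_cast hb
      rw [dif_neg hb, PySem.Int.mod_natCast a b, IH (a % b) (Nat.mod_lt _ (Nat.pos_of_ne_zero hb0)) b]
      rw [Nat.gcd_comm a b, Nat.gcd_rec b a, Nat.gcd_comm]

theorem gcdPy_natCast : ∀ (b a : ℕ), gcdPy (a : Int) (b : Int) = ((Nat.gcd a b : ℕ) : Int) := by
  intro b
  induction b using Nat.strong_induction_on with
  | _ b IH =>
    intro a
    rw [gcdPy]
    by_cases hb : (b : Int) = 0
    · have hb' : b = 0 := by exact_mod_cast hb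
      subst hb'; simp
    · have hb0 : b ≠ 0 := by exact_mod_cast hb
      rw [dif_neg hb, PySem.Int.mod_natCast a b, IH (a % b) (Nat.mod_lt _ (Nat.pos_of_ne_zero hb0)) b]
      rw [Nat.gcd_comm a b, Nat.gcd_rec b a, Nat.gcd_comm]

-- divOut removes every factor p from t (fuel tn always suffices)
theorem divOut_spec : ∀ (fuel tn pn : ℕ), 2 ≤ pn → 0 < tn → tn ≤ fuel →
    ∃ t' k : ℕ, divOut fuel (tn : Int) (pn : Int) = ((t' : ℕ) : Int) ∧ 0 < t' ∧ ¬ pn ∣ t' ∧ tn = t' * pn ^ k := by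
  intro fuel
  induction fuel with
  | zero => intro tn pn _ h1 h2; omega
  | succ fuel IH =>
    intro tn pn hp ht hfuel
    by_cases hdvd : pn ∣ tn
    · have hmod : tn % pn = 0 := by
        obtain ⟨c, hc⟩ := hdvd; rw [hc]; exact Nat.mul_mod_right pn c
      have hstep : divOut (fuel + 1) (tn : Int) (pn : Int) = divOut fuel ((tn / pn : ℕ) : Int) (pn : Int) := by
        rw [divOut, PySem.Int.mod_natCast, hmod, PySem.Int.floordiv_natCast]
        simp
      have hq : 0 < tn / pn := Nat.div_pos (Nat.le_of_dvd ht hdvd) (by omega)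
      have hlt : tn / pn < tn := Nat.div_lt_self ht (by omega)
      obtain ⟨t', k, h1, h2, h3, h4⟩ := IH (tn / pn) pn hp hq (by omega)
      refine ⟨t', k + 1, by rw [hstep, h1], h2, h3, ?_⟩
      rw [pow_succ, ← mul_assoc, ← h4, Nat.div_mul_cancel hdvd]
    · have hmod : tn % pn ≠ 0 := fun h => hdvd (Nat.dvd_of_mod_eq_zero h)
      refine ⟨tn, 0, ?_, ht, hdvd, by simp⟩
      rw [divOut, PySem.Int.mod_natCast]
      rw [if_neg (by exact_mod_cast hmod)]

theorem prodpow_eq_self {n : ℕ} (hn : n ≠ 0) :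
    ∏ q ∈ n.primeFactors, q ^ n.factorization q = n := by
  have h := Nat.prod_factorization_pow_eq_self hn
  rwa [Finsupp.prod, Nat.support_factorization] at h

-- one absorption step of the trial-division totient
theorem phi_step {n q0 phiN : ℕ} (S : Finset ℕ) (hq0 : q0.Prime) (hq0dvd : q0 ∣ n)
    (hndvd : ¬ q0 ∣ ∏ q ∈ S, q) (hq0S : q0 ∉ S)
    (hphi : phiN * ∏ q ∈ S, q = n * ∏ q ∈ S, (q - 1)) (hpos : 0 < phiN) :
    0 < phiN - phiN / q0 ∧
    (phiN - phiN / q0) * ∏ q ∈ insert q0 S, q = n * ∏ q ∈ insert q0 S, (q - 1) := by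
  have hdphi : q0 ∣ phiN := by
    have hco : q0.Coprime (∏ q ∈ S, q) := (hq0.coprime_iff_not_dvd).2 hndvd
    exact hco.dvd_of_dvd_mul_right (hphi ▸ (hq0dvd.mul_right _))
  obtain ⟨c, hc⟩ := hdphi
  have hc0 : 0 < c := by
    rcases Nat.eq_zero_or_pos c with h | h
    · subst h; simp at hc; omega
    · exact h
  have hdiv : phiN / q0 = c := by rw [hc, Nat.mul_div_cancel_left _ hq0.pos]
  have h2le := hq0.two_le
  have hsub : phiN - phiN / q0 = c * (q0 - 1) := by
    have e1 : c * (q0 - 1) + c = c * q0 := by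
      have h9 : (q0 - 1) + 1 = q0 := by omega
      calc c * (q0 - 1) + c = c * ((q0 - 1) + 1) := by ring
        _ = c * q0 := by rw [h9]
    have e2 : q0 * c = c * q0 := Nat.mul_comm q0 c
    omega
  constructor
  · have : 0 < c * (q0 - 1) := Nat.mul_pos hc0 (by omega)
    omega
  · rw [Finset.prod_insert hq0S, Finset.prod_insert hq0S, hsub]
    calc c * (q0 - 1) * (q0 * ∏ q ∈ S, q) = (q0 * c) * (∏ q ∈ S, q) * (q0 - 1) := by ring
      _ = phiN * (∏ q ∈ S, q) * (q0 - 1) := by rw [← hc]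
      _ = n * (∏ q ∈ S, (q - 1)) * (q0 - 1) := by rw [hphi]
      _ = n * ((q0 - 1) * ∏ q ∈ S, (q - 1)) := by ring

-- the trial-division loop computes the totient
theorem phiAux_go : ∀ (fuel pn tn phiN n : ℕ), 2 ≤ n → 2 ≤ pn →
    tn = ∏ q ∈ n.primeFactors.filter (fun q => pn ≤ q), q ^ n.factorization q →
    phiN * ∏ q ∈ n.primeFactors.filter (fun q => q < pn), q
      = n * ∏ q ∈ n.primeFactors.filter (fun q => q < pn), (q - 1) →
    0 < phiN → 1 ≤ fuel → tn + 2 ≤ fuel + pn →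
    phiAux fuel (phiN : Int) (tn : Int) (pn : Int) = ((n.totient : ℕ) : Int) := by
  intro fuel
  induction fuel with
  | zero => intro pn tn phiN n _ _ _ _ _ h6 _; omega
  | succ fuel IH =>
    intro pn tn phiN n hn hp htn hphi hpos _ hfuel
    have hn0 : n ≠ 0 := by omega
    have htpos : 0 < tn := by
      rw [htn]
      exact Finset.prod_pos (fun q hq =>
        pow_pos (Nat.prime_of_mem_primeFactors (Finset.mem_filter.1 hq).1).pos _)
    have htdvd : tn ∣ n := by
      rw [htn]
      exact dvd_trans
        (Finset.prod_dvd_prod_of_subset _ _ _ (Finset.filter_subset _ _))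
        (dvd_of_eq (prodpow_eq_self hn0))
    have hfacge : ∀ q : ℕ, q.Prime → q ∣ tn → pn ≤ q := by
      intro q hq hqt
      rw [htn] at hqt
      obtain ⟨r, hrF, hqr⟩ := hq.prime.exists_mem_finset_dvd hqt
      have hr := Finset.mem_filter.1 hrF
      have heq : q = r := (Nat.prime_dvd_prime_iff_eq hq
        (Nat.prime_of_mem_primeFactors hr.1)).1 (hq.dvd_of_dvd_pow hqr)
      omega
    rw [phiAux]
    by_cases hpt : pn * pn ≤ tn
    · have hptn : pn ≤ tn := le_trans (by nlinarith) hpt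
      rw [if_pos (by exact_mod_cast hpt), PySem.Int.mod_natCast]
      by_cases hdvd : pn ∣ tn
      · have hmod : tn % pn = 0 := by
          obtain ⟨c, hc⟩ := hdvd; rw [hc]; exact Nat.mul_mod_right pn c
        rw [if_pos (by exact_mod_cast hmod)]
        have hpp : pn.Prime := by
          have h1 : pn.minFac ∣ tn := (Nat.minFac_dvd pn).trans hdvd
          have h2 : pn.minFac.Prime := Nat.minFac_prime (by omega)
          have h3 : pn ≤ pn.minFac := hfacge _ h2 h1
          have h4 : pn.minFac ≤ pn := Nat.minFac_le (by omega)
          exact Nat.prime_def_minFac.2 ⟨hp, by omega⟩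
        have hpn_mem : pn ∈ n.primeFactors :=
          Nat.mem_primeFactors.2 ⟨hpp, hdvd.trans htdvd, hn0⟩
        obtain ⟨t', k, hdo, ht'pos, ht'nd, hteq⟩ := divOut_spec tn tn pn hp htpos le_rfl
        rw [Int.toNat_natCast, hdo]
        have hfd : (phiN : Int) - PySem.Int.floordiv (phiN : Int) (pn : Int)
            = ((phiN - phiN / pn : ℕ) : Int) := by
          rw [PySem.Int.floordiv_natCast]
          have hle : phiN / pn ≤ phiN := Nat.div_le_self _ _
          omega
        rw [hfd]
        have hS' : n.primeFactors.filter (fun q => q < pn + 1)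
            = insert pn (n.primeFactors.filter (fun q => q < pn)) := by
          ext q
          simp only [Finset.mem_filter, Finset.mem_insert]
          constructor
          · rintro ⟨hq, hlt⟩
            by_cases hqp : q = pn
            · exact Or.inl hqp
            · exact Or.inr ⟨hq, by omega⟩
          · rintro (rfl | ⟨hq, hlt⟩)
            · exact ⟨hpn_mem, by omega⟩
            · exact ⟨hq, by omega⟩
        have hpn_notS : pn ∉ n.primeFactors.filter (fun q => q < pn) := by
          simp [Finset.mem_filter]
        have hndvdP : ¬ pn ∣ ∏ q ∈ n.primeFactors.filter (fun q => q < pn), q := by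
          intro hd
          obtain ⟨r, hrF, hqr⟩ := hpp.prime.exists_mem_finset_dvd hd
          have hr := Finset.mem_filter.1 hrF
          have heq : pn = r := (Nat.prime_dvd_prime_iff_eq hpp
            (Nat.prime_of_mem_primeFactors hr.1)).1 hqr
          omega
        obtain ⟨hpos', hphi'⟩ := phi_step _ hpp (hdvd.trans htdvd) hndvdP hpn_notS hphi hpos
        -- t' is the product over the primes ≥ pn + 1
        have hF' : n.primeFactors.filter (fun q => pn + 1 ≤ q)
            = (n.primeFactors.filter (fun q => pn ≤ q)).erase pn := by
          ext q
          simp only [Finset.mem_filter, Finset.mem_erase]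
          constructor
          · rintro ⟨hq, h⟩; exact ⟨by omega, hq, by omega⟩
          · rintro ⟨hne, hq, h⟩
            exact ⟨hq, by omega⟩
        have hRsplit : tn = pn ^ n.factorization pn
            * ∏ q ∈ (n.primeFactors.filter (fun q => pn ≤ q)).erase pn, q ^ n.factorization q := by
          rw [htn, ← Finset.mul_prod_erase _ _ (Finset.mem_filter.2 ⟨hpn_mem, le_rfl⟩)]
        have hRpos : 0 < ∏ q ∈ (n.primeFactors.filter (fun q => pn ≤ q)).erase pn, q ^ n.factorization q :=
          Finset.prod_pos (fun q hq =>
            pow_pos (Nat.prime_of_mem_primeFactors (Finset.mem_filter.1 (Finset.mem_of_mem_erase hq)).1).pos _)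
        have hpnR : ¬ pn ∣ ∏ q ∈ (n.primeFactors.filter (fun q => pn ≤ q)).erase pn, q ^ n.factorization q := by
          intro hd
          obtain ⟨r, hrF, hqr⟩ := hpp.prime.exists_mem_finset_dvd hd
          have hrne : r ≠ pn := (Finset.mem_erase.1 hrF).1
          have hrmem := Finset.mem_filter.1 (Finset.mem_of_mem_erase hrF)
          have heq : pn = r := (Nat.prime_dvd_prime_iff_eq hpp
            (Nat.prime_of_mem_primeFactors hrmem.1)).1 (hpp.dvd_of_dvd_pow hqr)
          exact hrne heq.symm
        have hk : k = n.factorization pn := by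
          have h2 : t' * pn ^ k = pn ^ n.factorization pn
              * ∏ q ∈ (n.primeFactors.filter (fun q => pn ≤ q)).erase pn, q ^ n.factorization q := by
            rw [← hteq, hRsplit]
          have e2 := congrArg (fun m : ℕ => m.factorization pn) h2
          simp only [Nat.factorization_mul (by omega : t' ≠ 0) (pow_ne_zero _ (by omega : pn ≠ 0)),
            Nat.factorization_mul (pow_ne_zero _ (by omega : pn ≠ 0)) (by omega : (∏ q ∈ (n.primeFactors.filter (fun q => pn ≤ q)).erase pn, q ^ n.factorization q) ≠ 0),
            Nat.factorization_pow, Finsupp.add_apply, Finsupp.smul_apply, smul_eq_mul,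
            hpp.factorization, Finsupp.single_eq_same,
            Nat.factorization_eq_zero_of_not_dvd ht'nd,
            Nat.factorization_eq_zero_of_not_dvd hpnR] at e2
          omega
        have ht'eq : t' = ∏ q ∈ n.primeFactors.filter (fun q => pn + 1 ≤ q), q ^ n.factorization q := by
          rw [hF']
          have h2 : t' * pn ^ k = (∏ q ∈ (n.primeFactors.filter (fun q => pn ≤ q)).erase pn, q ^ n.factorization q) * pn ^ k := by
            rw [← hteq, hRsplit, hk]; ring
          exact Nat.eq_of_mul_eq_mul_right (pow_pos (by omega) k) h2
        have ht'le : t' ≤ tn := Nat.le_of_dvd htpos ⟨pn ^ k, hteq⟩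
        rw [show ((pn : Int) + 1) = ((pn + 1 : ℕ) : Int) by push_cast; ring]
        refine IH (pn + 1) t' (phiN - phiN / pn) n hn (by omega) ht'eq ?_ hpos' ?_ (by omega)
        · rw [hS']; exact hphi'
        · omega
      · have hmod : tn % pn ≠ 0 := fun h => hdvd (Nat.dvd_of_mod_eq_zero h)
        rw [if_neg (by exact_mod_cast hmod)]
        have hpn_nmem : pn ∉ n.primeFactors := by
          intro hmem
          have hF : pn ∈ n.primeFactors.filter (fun q => pn ≤ q) := Finset.mem_filter.2 ⟨hmem, le_rfl⟩
          have h1 : pn ^ n.factorization pn ∣ tn := htn ▸ Finset.dvd_prod_of_mem _ hF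
          have he : n.factorization pn ≠ 0 := by
            rw [← Nat.support_factorization] at hmem
            exact Finsupp.mem_support_iff.1 hmem
          exact hdvd ((dvd_pow_self pn he).trans h1)
        have hS2 : n.primeFactors.filter (fun q => q < pn + 1)
            = n.primeFactors.filter (fun q => q < pn) := by
          ext q
          simp only [Finset.mem_filter]
          constructor
          · rintro ⟨hq, h⟩
            refine ⟨hq, ?_⟩
            by_cases hqp : q = pn
            · subst hqp; exact absurd hq hpn_nmem
            · omega
          · rintro ⟨hq, h⟩; exact ⟨hq, by omega⟩
        have hF2 : n.primeFactors.filter (fun q => pn + 1 ≤ q)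
            = n.primeFactors.filter (fun q => pn ≤ q) := by
          ext q
          simp only [Finset.mem_filter]
          constructor
          · rintro ⟨hq, h⟩; exact ⟨hq, by omega⟩
          · rintro ⟨hq, h⟩
            refine ⟨hq, ?_⟩
            by_cases hqp : q = pn
            · subst hqp; exact absurd hq hpn_nmem
            · omega
        rw [show ((pn : Int) + 1) = ((pn + 1 : ℕ) : Int) by push_cast; ring]
        refine IH (pn + 1) tn phiN n hn (by omega) ?_ ?_ hpos ?_ (by omega)
        · rw [hF2]; exact htn
        · rw [hS2]; exact hphi
        · omega
    · rw [if_neg (by exact_mod_cast hpt)]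
      have hPpos : 0 < ∏ q ∈ n.primeFactors, q :=
        Finset.prod_pos (fun q hq => (Nat.prime_of_mem_primeFactors hq).pos)
      by_cases ht1 : 1 < tn
      · rw [if_pos (by exact_mod_cast ht1)]
        have hq0 : tn.Prime := by
          have hq0p : tn.minFac.Prime := Nat.minFac_prime (by omega)
          have hq0d : tn.minFac ∣ tn := Nat.minFac_dvd tn
          have hq0ge : pn ≤ tn.minFac := hfacge _ hq0p hq0d
          obtain ⟨t2, ht2⟩ := hq0d
          have ht2pos : 0 < t2 := by
            rcases Nat.eq_zero_or_pos t2 with h | h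
            · subst h; simp at ht2; omega
            · exact h
          by_cases h2 : t2 = 1
          · subst h2; rw [mul_one] at ht2; rw [ht2]; exact hq0p
          · exfalso
            have hq1p : t2.minFac.Prime := Nat.minFac_prime h2
            have ht2d : t2 ∣ tn := Dvd.intro_left _ ht2.symm
            have hq1d : t2.minFac ∣ tn := (Nat.minFac_dvd t2).trans ht2d
            have hq1ge : pn ≤ t2.minFac := hfacge _ hq1p hq1d
            have hle : t2.minFac ≤ t2 := Nat.minFac_le ht2pos
            nlinarith [ht2]
        have htnF : tn ∈ n.primeFactors.filter (fun q => pn ≤ q) :=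
          Finset.mem_filter.2 ⟨Nat.mem_primeFactors.2 ⟨hq0, htdvd, hn0⟩, hfacge tn hq0 dvd_rfl⟩
        have hFeq : n.primeFactors.filter (fun q => pn ≤ q) = {tn} := by
          apply Finset.eq_singleton_iff_unique_mem.2
          refine ⟨htnF, ?_⟩
          intro q hq
          have hqm := Finset.mem_filter.1 hq
          have hqp := Nat.prime_of_mem_primeFactors hqm.1
          have h1 : q ^ n.factorization q ∣ tn := htn ▸ Finset.dvd_prod_of_mem _ hq
          have he : n.factorization q ≠ 0 := by
            have hm := hqm.1
            rw [← Nat.support_factorization] at hm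
            exact Finsupp.mem_support_iff.1 hm
          have hd : q ∣ tn := (dvd_pow_self q he).trans h1
          exact (Nat.prime_dvd_prime_iff_eq hqp hq0).1 hd
        have htnge : pn ≤ tn := hfacge tn hq0 dvd_rfl
        have hnotS : tn ∉ n.primeFactors.filter (fun q => q < pn) := by
          simp only [Finset.mem_filter, not_and]
          intro _
          omega
        have hndvdP : ¬ tn ∣ ∏ q ∈ n.primeFactors.filter (fun q => q < pn), q := by
          intro hd
          obtain ⟨r, hrF, hqr⟩ := hq0.prime.exists_mem_finset_dvd hd
          have hr := Finset.mem_filter.1 hrF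
          have heq : tn = r := (Nat.prime_dvd_prime_iff_eq hq0
            (Nat.prime_of_mem_primeFactors hr.1)).1 hqr
          omega
        obtain ⟨hpos', hphi'⟩ := phi_step _ hq0 htdvd hndvdP hnotS hphi hpos
        have hins : insert tn (n.primeFactors.filter (fun q => q < pn)) = n.primeFactors := by
          ext q
          simp only [Finset.mem_insert, Finset.mem_filter]
          constructor
          · rintro (rfl | ⟨hq, _⟩)
            · exact Nat.mem_primeFactors.2 ⟨hq0, htdvd, hn0⟩
            · exact hq
          · intro hq
            by_cases hlt : q < pn
            · exact Or.inr ⟨hq, hlt⟩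
            · left
              have : q ∈ n.primeFactors.filter (fun r => pn ≤ r) :=
                Finset.mem_filter.2 ⟨hq, by omega⟩
              rw [hFeq] at this
              exact Finset.mem_singleton.1 this
        rw [hins] at hphi'
        have hfd : (phiN : Int) - PySem.Int.floordiv (phiN : Int) (tn : Int)
            = ((phiN - phiN / tn : ℕ) : Int) := by
          rw [PySem.Int.floordiv_natCast]
          have hle : phiN / tn ≤ phiN := Nat.div_le_self _ _
          omega
        rw [hfd]
        have hfin : phiN - phiN / tn = n.totient :=
          Nat.eq_of_mul_eq_mul_right hPpos
            (hphi'.trans (Nat.totient_mul_prod_primeFactors n).symm)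
        exact_mod_cast congrArg (fun m : ℕ => (m : Int)) hfin
      · rw [if_neg (by exact_mod_cast ht1)]
        have htn1 : tn = 1 := by omega
        have hSall : n.primeFactors.filter (fun q => q < pn) = n.primeFactors := by
          apply Finset.filter_true_of_mem
          intro q hq
          by_contra hge
          have hF : q ∈ n.primeFactors.filter (fun r => pn ≤ r) :=
            Finset.mem_filter.2 ⟨hq, by omega⟩
          have h1 : q ^ n.factorization q ∣ tn := htn ▸ Finset.dvd_prod_of_mem _ hF
          have he : n.factorization q ≠ 0 := by
            rw [← Nat.support_factorization] at hq
            exact Finsupp.mem_support_iff.1 hq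
          have hd : q ∣ tn := (dvd_pow_self q he).trans h1
          rw [htn1] at hd
          have := Nat.le_of_dvd (by omega) hd
          have hq2 := (Nat.prime_of_mem_primeFactors hq).two_le
          omega
        rw [hSall] at hphi
        have hfin : phiN = n.totient :=
          Nat.eq_of_mul_eq_mul_right hPpos
            (hphi.trans (Nat.totient_mul_prod_primeFactors n).symm)
        exact_mod_cast congrArg (fun m : ℕ => (m : Int)) hfin

theorem phiAux_correct (mn : ℕ) (hm : 2 ≤ mn) :
    phiAux (mn + 2) (mn : Int) (mn : Int) 2 = ((mn.totient : ℕ) : Int) := by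
  have h2 : ((2 : ℕ) : Int) = 2 := by norm_num
  rw [← h2]
  refine phiAux_go (mn + 2) 2 mn mn mn hm le_rfl ?_ ?_ (by omega) (by omega) (by omega)
  · have hF : mn.primeFactors.filter (fun q => 2 ≤ q) = mn.primeFactors :=
      Finset.filter_true_of_mem (fun q hq => (Nat.prime_of_mem_primeFactors hq).two_le)
    rw [hF, prodpow_eq_self (by omega)]
  · have hS : mn.primeFactors.filter (fun q => q < 2) = (∅ : Finset ℕ) :=
      Finset.filter_false_of_mem (fun q hq => by
        have := (Nat.prime_of_mem_primeFactors hq).two_le; omega)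
    rw [hS]; simp

-- Finset-to-list bridge for the coprime count
theorem card_coprime_countP (mn : ℕ) :
    ({a ∈ Finset.range mn | mn.Coprime a}).card
      = (List.range mn).countP (fun a => decide (mn.Coprime a)) := by
  rw [List.countP_eq_length_filter]
  rfl

-- the number of coprime x with 1 ≤ x < m is the totient of m
theorem totient_countP (mn : ℕ) (hm : 2 ≤ mn) :
    (PySem.List.pyRange 1 (mn : Int) 1).countP (fun x => decide (gcdB x (mn : Int) = 1))
      = mn.totient := by
  obtain ⟨k, rfl⟩ : ∃ k, mn = k + 2 := ⟨mn - 2, by omega⟩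
  rw [PySem.List.pyRange_one, List.countP_map]
  rw [show (((k + 2 : ℕ) : Int) - 1).toNat = k + 1 by omega]
  have h2 : ∀ j ∈ List.range (k + 1),
      (((fun x => decide (gcdB x ((k + 2 : ℕ) : Int) = 1)) ∘ (fun j : ℕ => (1 : Int) + (j : Int))) j = true
        ↔ (fun j : ℕ => decide ((k + 2).Coprime (j + 1))) j = true) := by
    intro j _
    simp only [Function.comp, decide_eq_true_iff]
    have hcast : ((1 : Int) + (j : Int)) = ((1 + j : ℕ) : Int) := by push_cast; ring
    have hgc : Nat.gcd (1 + j) (k + 2) = Nat.gcd (k + 2) (j + 1) := by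
      rw [Nat.gcd_comm, Nat.add_comm 1 j]
    rw [hcast, gcdB_natCast]
    constructor
    · intro h
      have hg : Nat.gcd (1 + j) (k + 2) = 1 := by exact_mod_cast h
      have : Nat.gcd (k + 2) (j + 1) = 1 := by omega
      exact this
    · intro h
      have hg : Nat.gcd (k + 2) (j + 1) = 1 := h
      have : Nat.gcd (1 + j) (k + 2) = 1 := by omega
      exact_mod_cast congrArg (fun m : ℕ => (m : Int)) this
  rw [List.countP_congr h2]
  conv_rhs => rw [Nat.totient_eq_card_coprime, card_coprime_countP]
  rw [show List.range (k + 2) = 0 :: List.map Nat.succ (List.range (k + 1)) from List.range_succ_eq_map]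
  rw [List.countP_cons, List.countP_map]
  have h0 : (decide ((k + 2).Coprime 0)) = false := by
    have : ¬ (k + 2).Coprime 0 := by rw [Nat.coprime_zero_right]; omega
    simp [this]
  rw [h0]
  simp only [Bool.false_eq_true, if_false, Nat.add_zero]
  exact List.countP_congr (fun j _ => by
    simp only [Function.comp, decide_eq_true_iff, Nat.succ_eq_add_one])

-- scanB returns the leftover count when there are fewer than r coprime x's …
theorem scanB_inr (m : Int) : ∀ (xs : List Int) (r : Int), 0 < r →
    ((xs.countP (fun x => decide (gcdB x m = 1)) : ℕ) : Int) < r →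
    scanB m xs r = .inr (r - ((xs.countP (fun x => decide (gcdB x m = 1)) : ℕ) : Int)) := by
  intro xs
  induction xs with
  | nil => intro r h1 h2; simp [scanB]
  | cons x xs IH =>
    intro r h1 h2
    rw [scanB]
    rw [List.countP_cons] at h2 ⊢
    by_cases hx : gcdB x m = 1
    · rw [if_pos hx]
      have hc : ((xs.countP (fun x => decide (gcdB x m = 1)) : ℕ) : Int) + 1 < r := by
        simp only [hx, decide_true, if_true] at h2
        push_cast at h2 ⊢
        omega
      rw [if_neg (show ¬ ((r - 1 : Int) = 0) by omega)]
      rw [IH (r - 1) (by omega) (by omega)]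
      congr 1
      simp only [hx, decide_true, if_true]
      push_cast
      ring
    · rw [if_neg hx]
      have hc : ((xs.countP (fun x => decide (gcdB x m = 1)) : ℕ) : Int) < r := by
        simp only [hx, decide_false] at h2
        push_cast at h2 ⊢
        omega
      rw [IH r h1 hc]
      congr 2
      simp [hx]

-- … and finds an answer when there are at least r of them
theorem scanB_inl (m : Int) : ∀ (xs : List Int) (r : Int), 0 < r →
    r ≤ ((xs.countP (fun x => decide (gcdB x m = 1)) : ℕ) : Int) →
    ∃ l, scanB m xs r = .inl l := by
  intro xs
  induction xs with
  | nil => intro r h1 h2; simp at h2; omega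
  | cons x xs IH =>
    intro r h1 h2
    rw [List.countP_cons] at h2
    by_cases hx : gcdB x m = 1
    · rw [scanB, if_pos hx]
      by_cases hr : (r - 1 : Int) = 0
      · exact ⟨[x, m - x], by rw [if_pos hr]⟩
      · rw [if_neg hr]
        refine IH (r - 1) (by omega) ?_
        simp only [hx, decide_true, if_true] at h2
        push_cast at h2 ⊢
        omega
    · rw [scanB, if_neg hx]
      refine IH r h1 ?_
      simp only [hx, decide_false] at h2
      push_cast at h2 ⊢
      omega

-- A's inner loop is B's scan, with the counter running up instead of down
theorem inner_eq (N d' : Int) : ∀ (xs : List Int) (a : Int), a + 1 ≤ N →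
    (∀ x ∈ xs, (gcdPy x (d' + 1 - x) = 1) ↔ (gcdB x (d' + 1) = 1)) →
    innerA N d' xs a = (match scanB (d' + 1) xs (N - a) with
      | .inl l => .inl l
      | .inr r => .inr (N - r)) := by
  intro xs
  induction xs with
  | nil =>
    intro a ha _
    show (Sum.inr a : (List Int) ⊕ Int) = Sum.inr (N - (N - a))
    rw [show N - (N - a) = a by ring]
  | cons x xs IH =>
    intro a ha hiff
    have hx := hiff x (by simp)
    simp only [innerA, scanB]
    by_cases hg : gcdB x (d' + 1) = 1
    · have hgA : gcdPy x (d' + 1 - x) = 1 := hx.2 hg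
      rw [if_pos hgA, if_pos hg]
      by_cases heq : a + 1 = N
      · rw [if_pos heq, if_pos (show N - a - 1 = 0 by omega)]
      · rw [if_neg heq, if_neg (show ¬ (N - a - 1 = 0) by omega)]
        rw [IH (a + 1) (by omega) (fun y hy => hiff y (by simp [hy]))]
        rw [show N - (a + 1) = N - a - 1 by ring]
    · have hgA : ¬ (gcdPy x (d' + 1 - x) = 1) := fun h => hg (hx.1 h)
      rw [if_neg hgA, if_neg hg]
      rw [if_neg (show ¬ (a = N) by omega)]
      exact IH a ha (fun y hy => hiff y (by simp [hy]))

-- the two diagonal loops stay in lockstep: A's address a is B's remaining count N - a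
theorem solve_sync (N : Int) : ∀ (fuel : Nat) (a d : Int), a + 1 ≤ N → 0 ≤ d →
    loopA N fuel a d = loopB fuel (N - a) (d + 1) := by
  intro fuel
  induction fuel with
  | zero => intro a d _ _; rfl
  | succ fuel IH =>
    intro a d ha hd
    have hm : (d + 1 + 1 : Int) = (((d + 1 + 1).toNat : ℕ) : Int) := by omega
    set mn := (d + 1 + 1).toNat with hmndef
    have hm2 : 2 ≤ mn := by omega
    simp only [loopA, loopB]
    have hphi : phiAux ((d + 1 + 1).toNat + 2) (d + 1 + 1) (d + 1 + 1) 2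
        = ((mn.totient : ℕ) : Int) := by
      rw [hm, Int.toNat_natCast]
      exact phiAux_correct mn hm2
    have hiff : ∀ x ∈ PySem.List.pyRange 1 (d + 1 + 1) 1,
        (gcdPy x (d + 1 + 1 - x) = 1) ↔ (gcdB x (d + 1 + 1) = 1) := by
      intro x hxmem
      have hxb := (PySem.List.mem_pyRange_one).1 hxmem
      obtain ⟨xn, rfl⟩ : ∃ xn : ℕ, x = (xn : Int) := ⟨x.toNat, by omega⟩
      have hxle : xn ≤ mn := by omega
      rw [show (d + 1 + 1 - (xn : Int)) = ((mn - xn : ℕ) : Int) by omega, hm,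
        gcdPy_natCast, gcdB_natCast, Nat.gcd_sub_self_right hxle]
    have hcnt : (PySem.List.pyRange 1 (d + 1 + 1) 1).countP
        (fun x => decide (gcdB x (d + 1 + 1) = 1)) = mn.totient := by
      rw [hm]
      exact totient_countP mn hm2
    have hinner := inner_eq N (d + 1) (PySem.List.pyRange 1 (d + 1 + 1) 1) a ha hiff
    rw [hphi]
    by_cases hgt : N - a > ((mn.totient : ℕ) : Int)
    · rw [if_pos hgt]
      have hscan := scanB_inr (d + 1 + 1) (PySem.List.pyRange 1 (d + 1 + 1) 1) (N - a)
        (by omega) (by rw [hcnt]; exact hgt)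
      rw [hcnt] at hscan
      rw [hscan] at hinner
      simp only at hinner
      rw [hinner]
      calc loopA N fuel (N - (N - a - ((mn.totient : ℕ) : Int))) (d + 1)
          = loopB fuel (N - (N - (N - a - ((mn.totient : ℕ) : Int)))) (d + 1 + 1) :=
            IH _ _ (by omega) (by omega)
        _ = loopB fuel (N - a - ((mn.totient : ℕ) : Int)) (d + 1 + 1) := by ring_nf
    · rw [if_neg hgt]
      obtain ⟨l, hscan⟩ := scanB_inl (d + 1 + 1) (PySem.List.pyRange 1 (d + 1 + 1) 1) (N - a)
        (by omega) (by rw [hcnt]; omega)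
      rw [hscan] at hinner ⊢
      rw [hinner]

-- ===== VERDICT (by name: the statement is the Claim_ definition above) =====
theorem solve_spec : Claim_equal_solve := by
  intro N _ hN
  unfold Spec_solve solve solve_alt
  have h := solve_sync N N.toNat 0 0 (by unfold Pre_solve at hN; omega) le_rfl
  simpa using h
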